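-- pv_equiv track=rewrite | github.com/chloesgit/nutriscore | Part_5/MajoritySorting.py | OptimisticmajoritySortingElement
-- ===== SOURCE A (Python) =====
-- def load_profiles(limiting_profiles):
--     profiles = []
--     for i in range(len(limiting_profiles[0])):
--         profile = []
--         for j in range(len(limiting_profiles)):
--             profile.append(limiting_profiles[j][i])
--         profiles.append(profile)
--     return profiles
--
-- def compute_score(a,weights,profile):
--     res = 0
--     for i,w in enumerate(a):
--         if w > profile[i]:
--             res += weights[i]
--     return res
--
-- def OptimisticmajoritySortingElement(a,weights,limiting_profiles,threshold):
--     profiles = load_profiles(limiting_profiles)[::-1]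
--     scores = []
--     category = 0
--     for profile in profiles:
--         score = compute_score(a,weights,profile)
--         scores.append(score)
--         if score < threshold:
--             category +=1
--     return category
-- ===== SOURCE B (Python) =====
-- def OptimisticmajoritySortingElement(a, weights, limiting_profiles, threshold):
--     scores = [0] * len(limiting_profiles[0])
--     for k, (v, row) in enumerate(zip(a, limiting_profiles)):
--         scores = [s + (weights[k] if v > x else 0) for s, x in zip(scores, row)]
--     return sum(1 for s in scores if s < threshold)
-- ===== Notes on version B (the rewrite author's own statement) =====
-- stated objective: alternative
-- what changed: B replaces A's transpose-then-score-each-column structure by a row-major single pass that maintains a vector of per-column running scores, updating all columns at once with a zip comprehension for each row, then counts the scores below the threshold.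
import Mathlib
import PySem

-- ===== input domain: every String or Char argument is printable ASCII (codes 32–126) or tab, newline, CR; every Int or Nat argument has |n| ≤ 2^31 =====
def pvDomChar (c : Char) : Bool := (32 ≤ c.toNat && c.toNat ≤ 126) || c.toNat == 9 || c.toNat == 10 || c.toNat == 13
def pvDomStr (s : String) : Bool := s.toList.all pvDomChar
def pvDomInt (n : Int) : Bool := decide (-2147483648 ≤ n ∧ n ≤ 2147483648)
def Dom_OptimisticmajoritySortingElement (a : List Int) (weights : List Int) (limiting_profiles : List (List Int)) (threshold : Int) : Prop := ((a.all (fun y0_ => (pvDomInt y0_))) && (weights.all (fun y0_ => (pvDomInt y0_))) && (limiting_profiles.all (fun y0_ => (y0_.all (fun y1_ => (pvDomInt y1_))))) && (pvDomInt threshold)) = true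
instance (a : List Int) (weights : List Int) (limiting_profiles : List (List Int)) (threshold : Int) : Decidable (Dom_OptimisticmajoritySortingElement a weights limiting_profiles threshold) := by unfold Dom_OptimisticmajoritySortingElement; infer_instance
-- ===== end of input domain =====

-- B replaces A's transpose-then-score-each-column structure by a row-major single pass that
-- maintains a vector of per-column running scores (alternative decomposition; same return value).

-- ===== PORT A =====
def pvLoadProfiles (limiting_profiles : List (List Int)) : List (List Int) :=
  (PySem.List.pyRange 0 ((PySem.List.pyGetD limiting_profiles 0 []).length) 1).foldl
    (fun profiles i =>
      profiles ++ [(PySem.List.pyRange 0 limiting_profiles.length 1).foldl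
        (fun profile j => profile ++ [PySem.List.pyGetD (PySem.List.pyGetD limiting_profiles j []) i 0]) []])
    []

def pvComputeScore (a : List Int) (weights : List Int) (profile : List Int) : Int :=
  (PySem.List.enumerate a 0).foldl
    (fun res p => if PySem.List.pyGetD profile p.1 0 < p.2 then res + PySem.List.pyGetD weights p.1 0 else res)
    0

def OptimisticmajoritySortingElement (a : List Int) (weights : List Int) (limiting_profiles : List (List Int)) (threshold : Int) : Int :=
  let profiles := (PySem.List.slice? (pvLoadProfiles limiting_profiles) none none (-1)).getD []
  (profiles.foldl
    (fun st profile =>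
      let score := pvComputeScore a weights profile
      (st.1 ++ [score], if score < threshold then st.2 + 1 else st.2))
    (([] : List Int), (0 : Int))).2

-- ===== PORT B =====
-- Source B line by line: scores = [0]*len(lp[0]); for k,(v,row) in enumerate(zip(a,lp)):
--   scores = [s + (weights[k] if v > x else 0) for s,x in zip(scores,row)]; return sum(1 for s in scores if s < threshold)
def OptimisticmajoritySortingElement_alt (a : List Int) (weights : List Int) (limiting_profiles : List (List Int)) (threshold : Int) : Int :=
  let scores0 : List Int := List.replicate (PySem.List.pyGetD limiting_profiles 0 []).length 0
  let scores := (PySem.List.enumerate (a.zip limiting_profiles) 0).foldl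
    (fun scores p =>
      List.zipWith (fun s x => s + (if x < p.2.1 then PySem.List.pyGetD weights p.1 0 else 0)) scores p.2.2)
    scores0
  scores.foldl (fun c s => if s < threshold then c + 1 else c) 0

-- ===== PRECONDITION & SPEC =====
-- Pre_ is exactly where Python A returns: nonempty profile matrix, every row at least as long as
-- row 0 (the transpose reads all rows), and when there is at least one column, len(a) ≤ rows and
-- weights[k] exists for every k that some column's comparison a[k] > lp[k][i] actually triggers.
def Pre_OptimisticmajoritySortingElement (a : List Int) (weights : List Int) (limiting_profiles : List (List Int)) (threshold : Int) : Prop :=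
  limiting_profiles ≠ [] ∧
  (∀ row ∈ limiting_profiles, (limiting_profiles.headD []).length ≤ row.length) ∧
  ((limiting_profiles.headD []).length = 0 ∨
    (a.length ≤ limiting_profiles.length ∧
      ∀ k < a.length, ∀ i < (limiting_profiles.headD []).length,
        (limiting_profiles.getD k []).getD i 0 < a.getD k 0 → k < weights.length))
instance (a : List Int) (weights : List Int) (limiting_profiles : List (List Int)) (threshold : Int) : Decidable (Pre_OptimisticmajoritySortingElement a weights limiting_profiles threshold) := by unfold Pre_OptimisticmajoritySortingElement; infer_instance

def pvWitness_OptimisticmajoritySortingElement : List Int × List Int × List (List Int) × Int :=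
  ([1, 0], [2, 3], [[0, 5], [1, -1]], 3)

def Spec_OptimisticmajoritySortingElement (a : List Int) (weights : List Int) (limiting_profiles : List (List Int)) (threshold : Int) (out : Int) : Prop := out = OptimisticmajoritySortingElement_alt a weights limiting_profiles threshold
instance (a : List Int) (weights : List Int) (limiting_profiles : List (List Int)) (threshold : Int) (out : Int) : Decidable (Spec_OptimisticmajoritySortingElement a weights limiting_profiles threshold out) := by unfold Spec_OptimisticmajoritySortingElement; infer_instance

-- ===== CLAIM (what is proved, stated in full; the proofs are below) =====
def Claim_equal_OptimisticmajoritySortingElement : Prop := ∀ (a : List Int) (weights : List Int) (limiting_profiles : List (List Int)) (threshold : Int), Dom_OptimisticmajoritySortingElement a weights limiting_profiles threshold → Pre_OptimisticmajoritySortingElement a weights limiting_profiles threshold → Spec_OptimisticmajoritySortingElement a weights limiting_profiles threshold (OptimisticmajoritySortingElement a weights limiting_profiles threshold)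

-- ===== LEMMAS AND PROOFS =====

-- A's outer loop: drop the scores accumulator, the count is a countP.
theorem pvPairFold (f : List Int → Int) (t : Int) :
    ∀ (ps : List (List Int)) (s : List Int) (c : Int),
      (ps.foldl (fun st p => (st.1 ++ [f p], if f p < t then st.2 + 1 else st.2)) (s, c)).2
        = c + (ps.countP (fun p => decide (f p < t)) : Int) := by
  intro ps
  induction ps with
  | nil => intro s c; simp
  | cons p ps ih =>
      intro s c
      simp only [List.foldl_cons, List.countP_cons, ih]
      by_cases h : f p < t <;> simp [h] <;> push_cast <;> ring

-- A's transpose as a map of maps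
theorem pvLoadProfiles_eq (lp : List (List Int)) :
    pvLoadProfiles lp
      = (PySem.List.pyRange 0 ((PySem.List.pyGetD lp 0 []).length : Int) 1).map
          (fun i => (PySem.List.pyRange 0 (lp.length : Int) 1).map
            (fun j => PySem.List.pyGetD (PySem.List.pyGetD lp j []) i 0)) := by
  unfold pvLoadProfiles
  rw [PySem.List.foldl_append_singleton_eq_map]
  apply List.map_congr_left
  intro i _
  rw [PySem.List.foldl_append_singleton_eq_map]
  simp

-- zipWith against a map of range is a map of range (row long enough)
theorem pvZipMapRange (f : Int → Int → Int) (g : Nat → Int) (row : List Int) (n : Nat)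
    (h : n ≤ row.length) :
    List.zipWith f ((List.range n).map g) row
      = (List.range n).map (fun j => f (g j) (row.getD j 0)) := by
  apply List.ext_getElem
  · simp [h]
  · intro i h1 h2
    have hi : i < n := by simpa using h2
    have hr : row[i]? = some row[i] := List.getElem?_eq_getElem (lt_of_lt_of_le hi h)
    simp [List.getElem_zipWith, List.getD, hr]

-- B's row-major fold of vector updates is, columnwise, a map of per-column folds.
theorem pvVecFold (weights : List Int) (n : Nat) :
    ∀ (l : List (Int × Int × List Int)) (g : Nat → Int),
      (∀ p ∈ l, n ≤ p.2.2.length) →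
      l.foldl
          (fun scores p =>
            List.zipWith (fun s x => s + (if x < p.2.1 then PySem.List.pyGetD weights p.1 0 else 0)) scores p.2.2)
          ((List.range n).map g)
        = (List.range n).map
            (fun j => l.foldl
              (fun s p => s + (if p.2.2.getD j 0 < p.2.1 then PySem.List.pyGetD weights p.1 0 else 0)) (g j)) := by
  intro l
  induction l with
  | nil => intro g _; simp
  | cons p l ih =>
      intro g hlen
      have hp : n ≤ p.2.2.length := hlen p (List.mem_cons_self ..)
      simp only [List.foldl_cons]
      rw [pvZipMapRange _ g _ n hp]
      exact ih _ (fun q hq => hlen q (List.mem_cons_of_mem _ hq))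

-- B's final counting loop is a countP.
theorem pvCountFold (t : Int) (l : List Int) :
    l.foldl (fun c s => if s < t then c + 1 else c) 0
      = (l.countP (fun s => decide (s < t)) : Int) := by
  have := PySem.List.foldl_ite_add_one (p := fun s => s < t) (l := l) (a := (0 : Int))
  simpa using this

-- per-column: A's score of column j equals B's per-column fold, given len(a) ≤ len(lp).
theorem pvColEq (a weights : List Int) (lp : List (List Int)) (j : Nat)
    (ha : a.length ≤ lp.length) :
    pvComputeScore a weights
        ((PySem.List.pyRange 0 (lp.length : Int) 1).map
          (fun i => PySem.List.pyGetD (PySem.List.pyGetD lp i []) (j : Int) 0))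
      = (PySem.List.enumerate (a.zip lp) 0).foldl
          (fun s p => s + (if p.2.2.getD j 0 < p.2.1 then PySem.List.pyGetD weights p.1 0 else 0)) 0 := by
  unfold pvComputeScore
  rw [PySem.List.enumerate_eq_map_pyRange (d := (0 : Int)),
      PySem.List.enumerate_eq_map_pyRange (d := ((0 : Int), ([] : List Int))),
      List.foldl_map, List.foldl_map]
  have hzlen : PySem.List.len (a.zip lp) = PySem.List.len a := by
    simp [PySem.List.len, List.length_zip, Nat.min_eq_left ha]
  rw [hzlen]
  apply PySem.List.foldl_congr_mem
  intro acc i hi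
  have hi' : 0 ≤ i ∧ i < (a.length : Int) := by
    simpa using (PySem.List.mem_pyRange_one).1 hi
  obtain ⟨hi0, hilt⟩ := hi'
  obtain ⟨m, rfl⟩ := Int.eq_ofNat_of_zero_le hi0
  have hma : m < a.length := by exact_mod_cast hilt
  have hml : m < lp.length := lt_of_lt_of_le hma ha
  have hmz : m < (a.zip lp).length := by simp [List.length_zip, Nat.min_eq_left ha, hma]
  have h1 : PySem.List.pyGetD a (m : Int) 0 = a[m] := by
    rw [PySem.List.pyGetD_natCast]; exact List.getD_eq_getElem _ _ hma
  have h2 : PySem.List.pyGetD (a.zip lp) (m : Int) ((0 : Int), ([] : List Int)) = (a[m], lp[m]) := by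
    rw [PySem.List.pyGetD_natCast]
    rw [List.getD_eq_getElem _ _ hmz]
    simp
  have h3 : PySem.List.pyGetD
      ((PySem.List.pyRange 0 (lp.length : Int) 1).map
        (fun i => PySem.List.pyGetD (PySem.List.pyGetD lp i []) (j : Int) 0)) (m : Int) 0
      = PySem.List.pyGetD (PySem.List.pyGetD lp (m : Int) []) (j : Int) 0 := by
    exact PySem.List.pyGetD_map_pyRange_of_nonneg _ _ _ _ (by positivity) (by exact_mod_cast hml)
  have h4 : PySem.List.pyGetD lp (m : Int) [] = lp[m] := by
    rw [PySem.List.pyGetD_natCast]; exact List.getD_eq_getElem _ _ hml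
  have h5 : PySem.List.pyGetD (lp[m]) (j : Int) 0 = (lp[m]).getD j 0 := by
    rw [PySem.List.pyGetD_natCast]
  rw [h1, h2, h3, h4, h5]
  split_ifs <;> simp

-- ===== VERDICT (by name: the statement is the Claim_ definition above) =====
theorem OptimisticmajoritySortingElement_spec : Claim_equal_OptimisticmajoritySortingElement := by
  intro a weights lp threshold _ hpre
  obtain ⟨hne, hrows, hcase⟩ := hpre
  unfold Spec_OptimisticmajoritySortingElement
  unfold OptimisticmajoritySortingElement OptimisticmajoritySortingElement_alt
  rw [PySem.List.slice?_none_none_neg_one]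
  simp only [Option.getD_some]
  rw [pvPairFold, pvLoadProfiles_eq, List.countP_reverse, List.countP_map, zero_add]
  -- head default bridge: pyGetD lp 0 [] = lp.headD []
  have hhead : PySem.List.pyGetD lp 0 [] = lp.headD [] := by
    cases lp with
    | nil => simp [PySem.List.pyGetD, PySem.List.pyGet?, PySem.List.pyIdx?]
    | cons r lp' => simp [PySem.List.pyGetD, PySem.List.pyGet?, PySem.List.pyIdx?]
  set n : Nat := (PySem.List.pyGetD lp 0 []).length with hn
  -- B's scores vector, columnwise
  have hrep : (List.replicate n (0 : Int)) = (List.range n).map (fun _ => (0 : Int)) := by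
    simp [List.map_const']
  have hlens : ∀ p ∈ PySem.List.enumerate (a.zip lp) 0, n ≤ p.2.2.length := by
    intro p hp
    have : p.2 ∈ a.zip lp := by
      have := PySem.List.map_snd_enumerate (xs := a.zip lp) (s := (0 : Int))
      exact this ▸ List.mem_map_of_mem hp
    have hmem : p.2.2 ∈ lp := List.of_mem_zip this |>.2
    have := hrows _ hmem
    rw [hn, hhead]; exact this
  rw [hrep, pvVecFold weights n _ _ hlens, pvCountFold, List.countP_map]
  -- A's count over pyRange → count over range
  have hpy : PySem.List.pyRange 0 (n : Int) 1 = (List.range n).map (fun (k : Nat) => (k : Int)) := by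
    rw [PySem.List.pyRange_one]
    simp only [Int.sub_zero, Int.toNat_natCast]
    exact List.map_congr_left (fun k _ => by omega)
  rw [hpy, List.countP_map]
  congr 1
  apply List.countP_congr
  intro j hj
  have hjn : j < n := List.mem_range.1 hj
  have ha : a.length ≤ lp.length := by
    rcases hcase with h0 | ⟨ha, _⟩
    · exfalso; rw [hn, hhead] at hjn; omega
    · exact ha
  simp only [Function.comp]
  rw [pvColEq a weights lp j ha]
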